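-- pv_equiv track=rewrite | github.com/szapf70/codecomp | codewars/python/solved/vertical_histogram.py | vertical_histogram_of
-- ===== SOURCE A (Python) =====
-- def vertical_histogram_of(s):
--     ca = [[chr(l),s.count(chr(l))] for l in range(65,91) if s.count(chr(l)) > 0]
--     rf = [[f[0] for f in ca]]
--     s = 1
--     used = True
--     while used:
--         lrf = []
--         used = False
--         for f in ca:
--             if f[1] >= s:
--                 lrf.append('*')
--                 used = True
--             else:
--                 lrf.append(' ')
--
--         if used:
--             rf.insert(0,lrf)
--             s += 1
--         else:
--             break
--
--     return "\n".join([" ".join(row).rstrip() for row in rf])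
-- ===== SOURCE B (Python) =====
-- def vertical_histogram_of(s):
--     tally = [0] * 26
--     for ch in s:
--         i = ord(ch) - 65
--         if 0 <= i < 26:
--             tally[i] += 1
--     letters = [chr(i + 65) for i, c in enumerate(tally) if c > 0]
--     heights = [c for c in tally if c > 0]
--     maxh = max(heights, default=0)
--     lines = [" ".join("*" if c >= h else " " for c in heights).rstrip()
--              for h in range(maxh, 0, -1)]
--     lines.append(" ".join(letters).rstrip())
--     return "\n".join(lines)
-- ===== Notes on version B (the rewrite author's own statement) =====
-- stated objective: alternative
-- what changed: B counts uppercase letters in one pass over the string into a 26-slot tally and emits the rows directly top-down over range(maxh, 0, -1), instead of A's 52 full-string s.count scans and its sentinel-flag while loop that prepends rows one level at a time; it trades A's C-implemented str.count scans for a single Python-level pass, so it is asymptotically leaner in scans but not measurably faster.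
import Mathlib
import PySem

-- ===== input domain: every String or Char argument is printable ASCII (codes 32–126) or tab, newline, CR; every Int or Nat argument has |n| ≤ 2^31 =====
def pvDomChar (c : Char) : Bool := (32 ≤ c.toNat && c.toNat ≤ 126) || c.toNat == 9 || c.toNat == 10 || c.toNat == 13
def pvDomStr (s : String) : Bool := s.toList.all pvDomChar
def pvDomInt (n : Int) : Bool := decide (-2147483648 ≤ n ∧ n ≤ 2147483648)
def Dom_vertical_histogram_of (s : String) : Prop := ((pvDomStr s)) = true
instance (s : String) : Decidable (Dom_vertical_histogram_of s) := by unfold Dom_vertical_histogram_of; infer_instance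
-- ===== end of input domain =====

-- B replaces A's 52 full-string s.count scans and its sentinel-flag while loop
-- (rows prepended one level at a time) by one counting pass over the string into a
-- 26-slot tally plus a direct top-down loop over range(maxh, 0, -1) (alternative
-- decomposition; not claimed faster).

-- ===== PORT A =====
-- chr(l) for an int l (A builds one-character strings)
def pvChrA (l : Int) : String := String.ofList [Char.ofNat l.toNat]

-- A's while loop; the fuel only makes the recursion structural: the loop body sets
-- used=False once the level exceeds every count, and counts are ≤ len(s), so
-- len(s)+2 units of fuel are never exhausted.
def pvLoopA (ca : List (String × Int)) : Nat → Int → List (List String) → List (List String)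
  | 0, _, rf => rf
  | fuel+1, lvl, rf =>
    let p := ca.foldl
      (fun (p : List String × Bool) f =>
        if f.2 ≥ lvl then (p.1 ++ ["*"], true) else (p.1 ++ [" "], p.2))
      ([], false)
    if p.2 then pvLoopA ca fuel (lvl + 1) (p.1 :: rf) else rf

def vertical_histogram_of (s : String) : String :=
  let ca : List (String × Int) :=
    ((PySem.List.pyRange 65 91 1).filter
        (fun l => decide ((PySem.Str.count s (pvChrA l) : Int) > 0))).map
      (fun l => (pvChrA l, (PySem.Str.count s (pvChrA l) : Int)))
  let rf : List (List String) := [ca.map (fun f => f.1)]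
  let rf := pvLoopA ca (s.toList.length + 2) 1 rf
  PySem.Str.join "\n" (rf.map (fun row => PySem.Str.rstrip (PySem.Str.join " " row)))

-- ===== PORT B =====
def vertical_histogram_of_alt (s : String) : String :=
  let tally : List Int := s.toList.foldl
    (fun t ch =>
      let i : Int := (ch.toNat : Int) - 65
      -- the guard 0 ≤ i < 26 puts the index in range, so List.getD/List.set are exact ports of tally[i] += 1
      if 0 ≤ i ∧ i < 26 then t.set i.toNat (t.getD i.toNat 0 + 1) else t)
    (List.replicate 26 0)
  let letters : List String :=
    ((PySem.List.enumerate tally).filter (fun p => decide (p.2 > 0))).map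
      (fun p => String.ofList [Char.ofNat (p.1 + 65).toNat])
  let heights : List Int := tally.filter (fun c => decide (c > 0))
  let maxh : Int := PySem.List.maxD heights id 0
  let lines : List String :=
    (PySem.List.pyRange maxh 0 (-1)).map
      (fun h => PySem.Str.rstrip (PySem.Str.join " "
        (heights.map (fun c => if c ≥ h then "*" else " "))))
  PySem.Str.join "\n" (lines ++ [PySem.Str.rstrip (PySem.Str.join " " letters)])

-- ===== PRECONDITION & SPEC =====
def Spec_vertical_histogram_of (s : String) (out : String) : Prop := out = vertical_histogram_of_alt s
instance (s : String) (out : String) : Decidable (Spec_vertical_histogram_of s out) := by unfold Spec_vertical_histogram_of; infer_instance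

-- ===== CLAIM (what is proved, stated in full; the proofs are below) =====
def Claim_equal_vertical_histogram_of : Prop := ∀ (s : String), Dom_vertical_histogram_of s → Spec_vertical_histogram_of s (vertical_histogram_of s)

-- ===== LEMMAS AND PROOFS =====

-- the uppercase letter with index j, as the one-character string both programs build
def pvChrN (j : Nat) : String := String.ofList [Char.ofNat (65 + j)]

theorem pvCharOfNat_toNat {n : Nat} (h : n < 55296) : (Char.ofNat n).toNat = n := by
  have hv : n.isValidChar := Or.inl h
  rw [Char.ofNat, dif_pos hv]
  simp [Char.toNat, Char.ofNatAux]

theorem pvChar_toNat_inj {a b : Char} (h : a.toNat = b.toNat) : a = b := by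
  cases a; cases b
  simp only [Char.toNat] at h
  exact Char.ext (UInt32.toNat_inj.mp h)

-- counting a one-character substring is counting the character
theorem pvCountGo_single (c : Char) :
    ∀ (fuel : Nat) (l : List Char) (acc : Nat), l.length ≤ fuel →
      PySem.Chars.count.go [c] fuel l acc = acc + l.count c := by
  intro fuel
  induction fuel with
  | zero =>
    intro l acc h
    have : l = [] := List.eq_nil_of_length_eq_zero (Nat.le_zero.mp h)
    subst this; simp [PySem.Chars.count.go]
  | succ n ih =>
    intro l acc h
    cases l with
    | nil => simp [PySem.Chars.count.go]
    | cons x t =>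
      simp only [PySem.Chars.count.go]
      by_cases hx : c = x
      · subst hx
        simp [List.isPrefixOf, ih t (acc + 1) (by simpa using h)]
        omega
      · simp [List.isPrefixOf, hx, ih t acc (by simpa using h), Ne.symm hx]

theorem pvCount_single (s : String) (c : Char) :
    PySem.Str.count s (String.ofList [c]) = s.toList.count c := by
  rw [PySem.Str.count_eq]
  have h1 : (String.ofList [c]).toList = [c] := by simp
  rw [h1]
  simp only [PySem.Chars.count, List.isEmpty]
  simp
  have h2 : s.length = s.toList.length := by simp
  rw [h2]
  simpa using pvCountGo_single c s.toList.length s.toList 0 le_rfl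

-- one step of B's tally loop, seen through getD
theorem pvTally_step (t : List Int) (ht : t.length = 26) (ch : Char) (j : Nat) (hj : j < 26) :
    ((let i : Int := (ch.toNat : Int) - 65;
      if 0 ≤ i ∧ i < 26 then t.set i.toNat (t.getD i.toNat 0 + 1) else t).getD j 0)
    = t.getD j 0 + (if ch = Char.ofNat (65 + j) then 1 else 0) := by
  have hcn : (Char.ofNat (65 + j)).toNat = 65 + j := pvCharOfNat_toNat (by omega)
  show (if 0 ≤ (ch.toNat : Int) - 65 ∧ (ch.toNat : Int) - 65 < 26 then
      t.set ((ch.toNat : Int) - 65).toNat (t.getD ((ch.toNat : Int) - 65).toNat 0 + 1) else t).getD j 0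
    = t.getD j 0 + (if ch = Char.ofNat (65 + j) then 1 else 0)
  by_cases hg : (0:Int) ≤ (ch.toNat : Int) - 65 ∧ (ch.toNat : Int) - 65 < 26
  · rw [if_pos hg]
    by_cases he : ((ch.toNat : Int) - 65).toNat = j
    · have hch : ch = Char.ofNat (65 + j) := by
        apply pvChar_toNat_inj; rw [hcn]; omega
      rw [he, List.getD_eq_getElem?_getD, List.getElem?_set_self (by omega)]
      simp [hch, List.getD_eq_getElem?_getD]
    · have hch : ¬ ch = Char.ofNat (65 + j) := by
        intro hc; apply he; rw [hc, hcn]; omega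
      rw [List.getD_eq_getElem?_getD, List.getElem?_set_ne he]
      simp [hch, List.getD_eq_getElem?_getD]
  · rw [if_neg hg]
    have hch : ¬ ch = Char.ofNat (65 + j) := by
      intro hc; rw [hc] at hg; omega
    simp [hch]

-- B's tally loop computes the 26 letter counts
theorem pvTally_aux (cs : List Char) :
    ∀ (t : List Int), t.length = 26 →
      cs.foldl
        (fun t ch =>
          let i : Int := (ch.toNat : Int) - 65
          if 0 ≤ i ∧ i < 26 then t.set i.toNat (t.getD i.toNat 0 + 1) else t) t
      = (List.range 26).map (fun j => t.getD j 0 + (cs.count (Char.ofNat (65 + j)) : Int)) := by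
  induction cs with
  | nil =>
    intro t ht
    simp only [List.foldl_nil, List.count_nil]
    apply List.ext_getElem
    · simp [ht]
    · intro i h1 h2
      simp only [List.getElem_map, List.getElem_range]
      rw [List.getD_eq_getElem?_getD, List.getElem?_eq_getElem (by simp at h2 ⊢; omega)]
      simp
  | cons ch cs ih =>
    intro t ht
    simp only [List.foldl_cons]
    rw [ih _ (by split <;> simp [ht])]
    apply List.map_congr_left
    intro j hj
    rw [List.mem_range] at hj
    rw [pvTally_step t ht ch j hj, List.count_cons]
    by_cases hch : ch = Char.ofNat (65 + j)
    · simp [hch]; ring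
    · simp [hch]

-- enumerate over a mapped range
theorem pvEnum_map_range' {α : Type} (f : Nat → α) :
    ∀ (n a : Nat), PySem.List.enumerate ((List.range' a n).map f) (a : Int)
      = (List.range' a n).map (fun (j : Nat) => ((j : Int), f j)) := by
  intro n
  induction n with
  | zero => intro a; simp
  | succ m ih =>
    intro a
    rw [List.range'_succ]
    simp only [List.map_cons, PySem.List.enumerate]
    have := ih (a + 1)
    push_cast at this ⊢
    rw [this]

-- the inner for loop of A's while body
theorem pvFold_row (lvl : Int) (l : List (String × Int)) :
    ∀ (acc : List String) (b : Bool),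
      l.foldl
        (fun (p : List String × Bool) f =>
          if f.2 ≥ lvl then (p.1 ++ ["*"], true) else (p.1 ++ [" "], p.2))
        (acc, b)
      = (acc ++ l.map (fun f => if f.2 ≥ lvl then "*" else " "),
         b || l.any (fun f => decide (f.2 ≥ lvl))) := by
  induction l with
  | nil => simp
  | cons x t ih =>
    intro acc b
    by_cases h : x.2 ≥ lvl <;> simp [h, ih]

-- the descending python range as a mapped List.range
theorem pvDescRange (a : Int) :
    PySem.List.pyRange a 0 (-1) = (List.range a.toNat).map (fun (k : Nat) => a - (k : Int)) := by
  simp only [PySem.List.pyRange]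
  norm_num
  by_cases h : 0 < a
  · simp [h, sub_eq_add_neg]
  · simp [h, Int.toNat_of_nonpos (le_of_not_gt h)]

-- nonempty lists have a max?
theorem pvMax?_isSome {α κ : Type} [LinearOrder κ] (xs : List α) (key : α → κ) (h : xs ≠ []) :
    (PySem.List.max? xs key).isSome := by
  cases xs with
  | nil => exact absurd rfl h
  | cons x t =>
    simp only [PySem.List.max?, List.foldl_cons]
    have : ∀ (l : List α) (m : α),
        (l.foldl (fun acc x => match acc with
          | none => some x
          | some m => if key m < key x then some x else some m) (some m)).isSome := by
      intro l
      induction l with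
      | nil => intro m; rfl
      | cons y u ih => intro m; simp only [List.foldl_cons]; split <;> apply ih
    exact this t x

-- A's while loop produces the rows for levels M, M-1, …, 1 (top-down)
theorem pvLoopA_spec (ca : List (String × Int)) (M : Int)
    (hany : ∀ lvl : Int, 1 ≤ lvl →
      (ca.any (fun f => decide (f.2 ≥ lvl))) = decide (lvl ≤ M)) :
    ∀ (fuel : Nat) (lvl : Int) (rf : List (List String)), 1 ≤ lvl → M < lvl + fuel →
      pvLoopA ca fuel lvl rf
      = ((List.range (M - lvl + 1).toNat).map
          (fun (k : Nat) => ca.map (fun f => if f.2 ≥ M - (k : Int) then "*" else " "))) ++ rf := by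
  intro fuel
  induction fuel with
  | zero =>
    intro lvl rf h1 h2
    have : (M - lvl + 1).toNat = 0 := by omega
    simp [pvLoopA, this]
  | succ n ih =>
    intro lvl rf h1 h2
    rw [pvLoopA, pvFold_row, hany lvl h1]
    by_cases hle : lvl ≤ M
    · rw [if_pos (by simp [hle])]
      rw [ih (lvl + 1) _ (by omega) (by omega)]
      have hn : (M - lvl + 1).toNat = (M - (lvl + 1) + 1).toNat + 1 := by omega
      rw [hn, List.range_succ, List.map_append]
      simp
      intro a b _
      have hmax : max (M - (lvl + 1) + 1) 0 = M - lvl := by omega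
      rw [hmax]
      by_cases hb : lvl ≤ b
      · rw [if_pos hb, if_pos (by omega)]
      · rw [if_neg hb, if_neg (by omega)]
    · rw [if_neg (by simp [hle])]
      have : (M - lvl + 1).toNat = 0 := by omega
      simp [this]


-- the letter index sets and counts both programs compute
def pvG (s : String) (j : Nat) : Int := (s.toList.count (Char.ofNat (65 + j)) : Int)
def pvS (s : String) : List Nat := (List.range 26).filter (fun j => decide (0 < pvG s j))
def pvHs (s : String) : List Int := (pvS s).map (pvG s)
def pvM (s : String) : Int := PySem.List.maxD (pvHs s) id 0

-- A's ca list, rewritten over the letter indices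
theorem pvCa_eq (s : String) :
    ((PySem.List.pyRange 65 91 1).filter
        (fun l => decide ((PySem.Str.count s (pvChrA l) : Int) > 0))).map
      (fun l => (pvChrA l, (PySem.Str.count s (pvChrA l) : Int)))
    = (pvS s).map (fun j => (pvChrN j, pvG s j)) := by
  have hrange : PySem.List.pyRange 65 91 1 = (List.range 26).map (fun j => ((65 + j : Nat) : Int)) := by decide
  have hchr : ∀ j : Nat, pvChrA ((65 + j : Nat) : Int) = pvChrN j := by
    intro j; simp only [pvChrA, pvChrN, Int.toNat_natCast]
  rw [hrange, List.filter_map]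
  have hfilter : (List.range 26).filter
      ((fun l => decide ((PySem.Str.count s (pvChrA l) : Int) > 0)) ∘ (fun j : Nat => ((65 + j : Nat) : Int)))
      = pvS s := by
    apply List.filter_congr
    intro j hj
    simp only [Function.comp_apply, hchr j, pvChrN, pvG, pvCount_single]
    rfl
  rw [hfilter, List.map_map]
  apply List.map_congr_left
  intro j hj
  simp only [Function.comp_apply, hchr j, pvChrN, pvG, pvCount_single]

-- B's tally, letters and heights over the same indices
theorem pvTally_eq (s : String) :
    s.toList.foldl
      (fun t ch =>
        let i : Int := (ch.toNat : Int) - 65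
        if 0 ≤ i ∧ i < 26 then t.set i.toNat (t.getD i.toNat 0 + 1) else t)
      (List.replicate 26 0)
    = (List.range 26).map (pvG s) := by
  rw [pvTally_aux s.toList (List.replicate 26 0) (by simp)]
  apply List.map_congr_left
  intro j hj
  rw [List.mem_range] at hj
  rw [List.getD_eq_getElem?_getD, List.getElem?_replicate]
  simp [hj, pvG]

theorem pvHeights_eq (s : String) :
    ((List.range 26).map (pvG s)).filter (fun c => decide (c > 0)) = (pvS s).map (pvG s) := by
  rw [List.filter_map]
  rfl

theorem pvLetters_eq (s : String) :
    ((PySem.List.enumerate ((List.range 26).map (pvG s))).filter (fun p => decide (p.2 > 0))).map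
      (fun p => String.ofList [Char.ofNat (p.1 + 65).toNat])
    = (pvS s).map pvChrN := by
  rw [List.range_eq_range']
  rw [show PySem.List.enumerate ((List.range' 0 26).map (pvG s)) 0
      = PySem.List.enumerate ((List.range' 0 26).map (pvG s)) ((0 : Nat) : Int) from rfl]
  rw [pvEnum_map_range' (pvG s) 26 0]
  rw [List.filter_map, List.map_map]
  have hfilter : (List.range' 0 26).filter
      ((fun p : Int × Int => decide (p.2 > 0)) ∘ (fun j : Nat => ((j : Int), pvG s j)))
      = pvS s := by
    rw [← List.range_eq_range']
    apply List.filter_congr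
    intro j hj; rfl
  rw [hfilter]
  apply List.map_congr_left
  intro j hj
  simp only [Function.comp_apply, pvChrN]
  have h65 : ((j : Int) + 65).toNat = 65 + j := by omega
  rw [h65]

-- facts about the maximal height pvM
theorem pvM_ub (s : String) : ∀ c ∈ pvHs s, c ≤ pvM s := by
  intro c hc
  have hne : pvHs s ≠ [] := List.ne_nil_of_mem hc
  obtain ⟨m, hm⟩ := Option.isSome_iff_exists.mp (pvMax?_isSome (pvHs s) id hne)
  have : pvM s = m := by simp [pvM, PySem.List.maxD, hm]
  rw [this]
  simpa using PySem.List.max?_isMax hm c hc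

theorem pvM_mem (s : String) (h : pvHs s ≠ []) : pvM s ∈ pvHs s := by
  obtain ⟨m, hm⟩ := Option.isSome_iff_exists.mp (pvMax?_isSome (pvHs s) id h)
  have : pvM s = m := by simp [pvM, PySem.List.maxD, hm]
  rw [this]
  exact PySem.List.max?_mem hm

theorem pvM_le_len (s : String) : pvM s ≤ s.toList.length := by
  by_cases h : pvHs s = []
  · have : pvM s = 0 := by simp [pvM, h, PySem.List.maxD, PySem.List.max?]
    rw [this]; positivity
  · obtain ⟨j, hj, hgj⟩ := List.mem_map.mp (pvM_mem s h)
    rw [← hgj]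
    simp only [pvG]
    exact_mod_cast List.count_le_length

-- the `used` flag of A's loop tests exactly lvl ≤ pvM
theorem pvAny (s : String) : ∀ lvl : Int, 1 ≤ lvl →
    (((pvS s).map (fun j => (pvChrN j, pvG s j))).any (fun f => decide (f.2 ≥ lvl)))
    = decide (lvl ≤ pvM s) := by
  intro lvl hlvl
  rw [List.any_map, Bool.eq_iff_iff]
  simp only [List.any_eq_true, Function.comp_apply, decide_eq_true_eq, ge_iff_le]
  constructor
  · rintro ⟨j, hj, hle⟩
    exact le_trans hle (pvM_ub s _ (List.mem_map_of_mem hj))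
  · intro hle
    by_cases h : pvHs s = []
    · exfalso
      have : pvM s = 0 := by simp [pvM, h, PySem.List.maxD, PySem.List.max?]
      omega
    · obtain ⟨j, hj, hgj⟩ := List.mem_map.mp (pvM_mem s h)
      exact ⟨j, hj, by rw [hgj]; exact hle⟩

-- ===== VERDICT (by name: the statement is the Claim_ definition above) =====
theorem vertical_histogram_of_spec : Claim_equal_vertical_histogram_of := by
  intro s _
  unfold Spec_vertical_histogram_of
  simp only [vertical_histogram_of, vertical_histogram_of_alt]
  rw [pvCa_eq s, pvTally_eq s, pvLetters_eq s, pvHeights_eq s]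
  rw [show PySem.List.maxD ((pvS s).map (pvG s)) id 0 = pvM s from rfl]
  rw [pvDescRange (pvM s)]
  rw [pvLoopA_spec _ (pvM s) (pvAny s) (s.toList.length + 2) 1 _ le_rfl
      (by have := pvM_le_len s; omega)]
  simp only [List.map_append, List.map_map, List.map_cons, List.map_nil]
  rw [show pvM s - 1 + 1 = pvM s from by ring]
  congr 1
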